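-- pv_equiv track=rewrite | github.com/daniel-reich/ubiquitous-fiesta | 28mJ6NgqbQS4YRgDc_8.py | can_pay_cost
-- ===== SOURCE A (Python) =====
-- def can_pay_cost(mana_pool, cost):
--     mana_pool = list(mana_pool)
--     num = "".join([x for x in  cost if x.isnumeric()])
--     cost = cost[len(num) :]
--     for i in cost:
--         if i in mana_pool:
--             mana_pool.remove(i)
--         else:
--             return False
--     if num:
--         return len(mana_pool) >= int(num)
--     else:
--         return True
-- ===== SOURCE B (Python) =====
-- def can_pay_cost(mana_pool, cost):
--     # One pass: count the pool and the colored symbols into dicts, then compare counts.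
--     have = {}
--     for m in mana_pool:
--         have[m] = have.get(m, 0) + 1
--     num = "".join(c for c in cost if c.isnumeric())
--     colored = cost[len(num):]
--     need = {}
--     for c in colored:
--         need[c] = need.get(c, 0) + 1
--     for c, k in need.items():
--         if have.get(c, 0) < k:
--             return False
--     return not num or len(mana_pool) - len(colored) >= int(num)
-- ===== Notes on version B (the rewrite author's own statement) =====
-- stated objective: faster
-- what changed: Replaces A's per-symbol membership test and in-place removal from the pool (O(c*p)) with two hash-count dictionaries built in one pass each and a single count comparison (O(c+p)).
import Mathlib
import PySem

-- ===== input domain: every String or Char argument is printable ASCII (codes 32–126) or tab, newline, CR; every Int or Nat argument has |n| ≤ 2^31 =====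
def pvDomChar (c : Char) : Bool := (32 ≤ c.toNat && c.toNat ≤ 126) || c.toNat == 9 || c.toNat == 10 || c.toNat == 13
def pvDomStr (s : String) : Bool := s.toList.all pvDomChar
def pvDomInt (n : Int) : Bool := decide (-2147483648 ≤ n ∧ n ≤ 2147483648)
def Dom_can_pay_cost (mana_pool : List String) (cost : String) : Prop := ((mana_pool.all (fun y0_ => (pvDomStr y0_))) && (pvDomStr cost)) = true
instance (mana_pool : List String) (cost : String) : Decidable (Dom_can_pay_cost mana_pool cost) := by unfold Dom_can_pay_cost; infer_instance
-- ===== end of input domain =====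

-- B replaces A's per-symbol membership-and-remove loop over the pool by counting dictionaries
-- built in one pass each (measurably faster, asymptotic). A mutates only its local copy of the
-- pool, so there is no observable side effect to match.

-- ===== PORT A =====
-- the for-loop: 'if i in mana_pool: mana_pool.remove(i) else: return False'
-- (remove? is none exactly when the symbol is not in the pool)
def payLoopA (pool : List String) (syms : List String) : Option (List String) :=
  match syms with
  | [] => some pool
  | i :: rest =>
    match PySem.List.remove? pool i with
    | some p => payLoopA p rest
    | none => none

-- x.isnumeric = Chars.isdigit on the printable-ASCII domain (no non-ASCII numerics there);
-- int(num) never raises here since num is a nonempty string of digits, so getD 0 is never taken.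
def can_pay_cost (mana_pool : List String) (cost : String) : Bool :=
  let cs := cost.toList
  let num := cs.filter PySem.Chars.isdigit
  let rest := (cs.drop num.length).map (fun c => String.ofList [c])   -- cost[len(num):], iterated char by char
  match payLoopA mana_pool rest with
  | none => false
  | some pool' =>
    if num ≠ [] then decide ((pool'.length : Int) ≥ (PySem.Int.ofChars? num).getD 0)
    else true

-- ===== PORT B =====
def can_pay_cost_alt (mana_pool : List String) (cost : String) : Bool :=
  let haveD := mana_pool.foldl (fun d m => d.insert m (d.getD m 0 + 1)) (PySem.Dict.empty : PySem.Dict String Int)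
  let cs := cost.toList
  let num := cs.filter PySem.Chars.isdigit
  let colored := (cs.drop num.length).map (fun c => String.ofList [c])
  let needD := colored.foldl (fun d c => d.insert c (d.getD c 0 + 1)) (PySem.Dict.empty : PySem.Dict String Int)
  if needD.items.all (fun ck => !(haveD.getD ck.1 0 < ck.2)) then
    (num.isEmpty) || decide ((mana_pool.length : Int) - colored.length ≥ (PySem.Int.ofChars? num).getD 0)
  else false

-- ===== PRECONDITION & SPEC =====
def Spec_can_pay_cost (mana_pool : List String) (cost : String) (out : Bool) : Prop := out = can_pay_cost_alt mana_pool cost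
instance (mana_pool : List String) (cost : String) (out : Bool) : Decidable (Spec_can_pay_cost mana_pool cost out) := by unfold Spec_can_pay_cost; infer_instance

-- ===== CLAIM (what is proved, stated in full; the proofs are below) =====
def Claim_equal_can_pay_cost : Prop := ∀ (mana_pool : List String) (cost : String), Dom_can_pay_cost mana_pool cost → Spec_can_pay_cost mana_pool cost (can_pay_cost mana_pool cost)

-- ===== LEMMAS AND PROOFS =====

-- A's removal loop succeeds iff every symbol's multiplicity in syms is covered by the pool
lemma payLoopA_isSome (syms : List String) (pool : List String) :
    (payLoopA pool syms).isSome = true ↔ ∀ s, syms.count s ≤ pool.count s := by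
  induction syms generalizing pool with
  | nil => simp [payLoopA]
  | cons i rest ih =>
    by_cases h : i ∈ pool
    · rw [payLoopA, PySem.List.remove?_eq_some_erase pool i h]
      rw [ih]
      constructor
      · intro H s
        rcases eq_or_ne s i with rfl | hne
        · have h1 : 1 ≤ pool.count s := List.one_le_count_iff.mpr h
          have h2 := H s
          rw [List.count_erase_self] at h2
          rw [List.count_cons_self]
          omega
        · have h2 := H s
          rw [List.count_erase_of_ne hne] at h2
          rw [List.count_cons_of_ne hne.symm]
          exact h2
      · intro H s
        rcases eq_or_ne s i with rfl | hne
        · have h2 := H s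
          rw [List.count_cons_self] at h2
          rw [List.count_erase_self]
          omega
        · have h2 := H s
          rw [List.count_cons_of_ne hne.symm] at h2
          rw [List.count_erase_of_ne hne]
          exact h2
    · rw [payLoopA, (PySem.List.remove?_eq_none_iff pool i).mpr h]
      simp only [Option.isSome_none, Bool.false_eq_true, false_iff, not_forall]
      refine ⟨i, ?_⟩
      have : pool.count i = 0 := List.count_eq_zero.mpr h
      rw [List.count_cons_self, this]
      omega

-- on success the remaining pool has pool.length - syms.length elements
lemma payLoopA_length (syms : List String) (pool p : List String)
    (h : payLoopA pool syms = some p) : p.length + syms.length = pool.length := by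
  induction syms generalizing pool with
  | nil =>
    simp only [payLoopA, Option.some.injEq] at h
    simp [h]
  | cons i rest ih =>
    by_cases hm : i ∈ pool
    · rw [payLoopA, PySem.List.remove?_eq_some_erase pool i hm] at h
      have := ih (pool.erase i) h
      have hl : (pool.erase i).length = pool.length - 1 := List.length_erase_of_mem hm
      have h1 : 1 ≤ pool.length := List.length_pos_of_mem hm
      simp only [List.length_cons]
      omega
    · rw [payLoopA, (PySem.List.remove?_eq_none_iff pool i).mpr hm] at h
      simp at h

-- B's dictionary comparison says exactly: every symbol's multiplicity is covered by the pool
lemma bcond_iff (pool colored : List String) :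
    ((colored.foldl (fun d c => d.insert c (d.getD c 0 + 1)) (PySem.Dict.empty : PySem.Dict String Int)).items.all
      (fun ck => !((pool.foldl (fun d m => d.insert m (d.getD m 0 + 1)) (PySem.Dict.empty : PySem.Dict String Int)).getD ck.1 0 < ck.2)) = true)
    ↔ ∀ s, colored.count s ≤ pool.count s := by
  rw [PySem.Dict.foldl_insert_getD_add_one_eq_counter, PySem.Dict.foldl_insert_getD_add_one_eq_counter,
      PySem.Dict.items_counter]
  simp only [List.all_map, List.all_eq_true, PySem.Set.mem_ofList, Function.comp,
    PySem.Dict.getD_counter, Bool.not_eq_true', decide_eq_false_iff_not, not_lt]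
  constructor
  · intro H s
    by_cases hs : s ∈ colored
    · exact_mod_cast H s hs
    · simp [List.count_eq_zero.mpr hs]
  · intro H s hs
    exact_mod_cast H s

-- ===== VERDICT (by name: the statement is the Claim_ definition above) =====
theorem can_pay_cost_spec : Claim_equal_can_pay_cost := by
  intro mana_pool cost _
  unfold Spec_can_pay_cost
  simp only [can_pay_cost, can_pay_cost_alt]
  cases hp : payLoopA mana_pool ((cost.toList.drop (cost.toList.filter PySem.Chars.isdigit).length).map (fun c => String.ofList [c])) with
  | none =>
    have hno : ¬ ∀ s, ((cost.toList.drop (cost.toList.filter PySem.Chars.isdigit).length).map (fun c => String.ofList [c])).count s ≤ mana_pool.count s := by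
      rw [← payLoopA_isSome, hp]; simp
    dsimp only
    rw [if_neg (by rw [bcond_iff]; exact hno)]
  | some p =>
    have hyes : ∀ s, ((cost.toList.drop (cost.toList.filter PySem.Chars.isdigit).length).map (fun c => String.ofList [c])).count s ≤ mana_pool.count s := by
      rw [← payLoopA_isSome, hp]; simp
    have hlen := payLoopA_length _ _ _ hp
    dsimp only
    rw [if_pos ((bcond_iff _ _).mpr hyes)]
    have hint : (p.length : Int) = (mana_pool.length : Int) - (((cost.toList.drop (cost.toList.filter PySem.Chars.isdigit).length).map (fun c => String.ofList [c])).length : Int) := by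
      omega
    by_cases hnum : (cost.toList.filter PySem.Chars.isdigit) = []
    · simp [hnum]
    · rw [if_pos hnum]
      rw [List.isEmpty_eq_false_iff.mpr hnum]  -- num.isEmpty = false
      simp only [List.length_map, Bool.false_or]
      rw [List.length_map] at hint
      rw [hint]
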